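-- pv_equiv track=rewrite | github.com/parabix/parabix-devel-mirror | scripts/UCD/graphemebreak.py | grepcases2
-- ===== SOURCE A (Python) =====
-- grepcase_template = r"""<grepcase regexp="%s" datafile="graphemebreaktests" greplines="%s"/>
-- """
--
-- def grepcases2(tests):
--     by_grapheme_count = {}
--     for i in range(len(tests)):
--         (cps, syms) = tests[i]
--         line_no = i + 1
--         grapheme_count = len([x for x in syms if x])
--         if grapheme_count in by_grapheme_count:
--             by_grapheme_count[grapheme_count].append(line_no)
--         else:
--             by_grapheme_count[grapheme_count] = [line_no]
--     cases = ""
--     for c in sorted(by_grapheme_count.keys()):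
--         expr = "^" + ("\\X" * c) + "$"
--         lines = " ".join([repr(line_no) for line_no in by_grapheme_count[c]])
--         cases += grepcase_template % (expr, lines)
--     return cases
-- ===== SOURCE B (Python) =====
-- grepcase_template = r"""<grepcase regexp="%s" datafile="graphemebreaktests" greplines="%s"/>
-- """
--
-- def grepcases2(tests):
--     counts = [len([x for x in syms if x]) for (_cps, syms) in tests]
--     cases = ""
--     for c in sorted(set(counts)):
--         lines = " ".join(repr(i + 1) for i, k in enumerate(counts) if k == c)
--         cases += grepcase_template % ("^" + "\\X" * c + "$", lines)
--     return cases
-- ===== Notes on version B (the rewrite author's own statement) =====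
-- stated objective: simpler
-- what changed: B drops A's incrementally-grown dict of per-count line-number lists: it computes a flat counts list in one pass, then iterates sorted(set(counts)) and collects each block's line numbers with a per-count filter over enumerate(counts).
import Mathlib
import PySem

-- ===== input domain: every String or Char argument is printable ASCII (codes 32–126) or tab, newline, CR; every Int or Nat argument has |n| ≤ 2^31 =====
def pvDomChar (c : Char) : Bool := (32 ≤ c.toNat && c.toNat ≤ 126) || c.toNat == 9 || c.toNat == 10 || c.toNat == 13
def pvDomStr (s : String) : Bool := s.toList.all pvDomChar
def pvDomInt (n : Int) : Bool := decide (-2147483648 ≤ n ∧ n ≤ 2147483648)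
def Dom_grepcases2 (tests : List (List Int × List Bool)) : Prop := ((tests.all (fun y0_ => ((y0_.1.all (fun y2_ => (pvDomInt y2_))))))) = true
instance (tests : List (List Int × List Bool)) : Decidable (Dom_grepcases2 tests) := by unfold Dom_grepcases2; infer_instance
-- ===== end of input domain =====

-- B replaces A's incrementally-grown dict of line-number lists by a plain counts list,
-- iterating sorted(set(counts)) and filtering the counts list per distinct count (objective: simpler).

-- the module-level template constant, as a formatting function (Python's grepcase_template % (expr, lines))
def grepcaseTemplate (expr lines : String) : String :=
  "<grepcase regexp=\"" ++ expr ++ "\" datafile=\"graphemebreaktests\" greplines=\"" ++ lines ++ "\"/>\n"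

-- ===== PORT A =====
-- 'for i in range(len(tests)): (cps, syms) = tests[i]; line_no = i + 1' is ported as a fold
-- over PySem.List.enumerate tests 0 (i is always in range, so tests[i] is exactly the enumerated element).
def grepcases2 (tests : List (List Int × List Bool)) : String :=
  let d : PySem.Dict Int (List Int) :=
    (PySem.List.enumerate tests 0).foldl (fun d p =>
      let line_no : Int := p.1 + 1
      let grapheme_count : Int := ((p.2.2.filter (fun x => x)).length : Int)
      match d.get? grapheme_count with
      | some l => d.insert grapheme_count (l ++ [line_no])
      | none   => d.insert grapheme_count [line_no]) PySem.Dict.empty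
  (PySem.List.sorted d.keys (fun k => k) false).foldl (fun cases c =>
    let expr := "^" ++ PySem.Str.join "" (List.replicate c.toNat "\\X") ++ "$"
    let lines := PySem.Str.join " " ((d.getD c []).map PySem.Int.toStr)
    cases ++ grepcaseTemplate expr lines) ""

-- ===== PORT B =====
def grepcases2_alt (tests : List (List Int × List Bool)) : String :=
  let counts : List Int := tests.map (fun t => ((t.2.filter (fun x => x)).length : Int))
  (PySem.List.sorted (PySem.Set.ofList counts) (fun k => k) false).foldl (fun cases c =>
    let lines := PySem.Str.join " "
      (((PySem.List.enumerate counts 0).filter (fun p => p.2 == c)).map (fun p => PySem.Int.toStr (p.1 + 1)))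
    cases ++ grepcaseTemplate ("^" ++ PySem.Str.join "" (List.replicate c.toNat "\\X") ++ "$") lines) ""

-- ===== PRECONDITION & SPEC =====
def Spec_grepcases2 (tests : List (List Int × List Bool)) (out : String) : Prop := out = grepcases2_alt tests
instance (tests : List (List Int × List Bool)) (out : String) : Decidable (Spec_grepcases2 tests out) := by unfold Spec_grepcases2; infer_instance

-- ===== CLAIM (what is proved, stated in full; the proofs are below) =====
def Claim_equal_grepcases2 : Prop := ∀ (tests : List (List Int × List Bool)), Dom_grepcases2 tests → Spec_grepcases2 tests (grepcases2 tests)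

-- ===== LEMMAS AND PROOFS =====

theorem enumerate_map {α β : Type} (f : α → β) (xs : List α) (s : Int) :
    PySem.List.enumerate (xs.map f) s = (PySem.List.enumerate xs s).map (fun p => (p.1, f p.2)) := by
  induction xs generalizing s with
  | nil => simp [PySem.List.enumerate_nil]
  | cons x t ih => simp [PySem.List.enumerate_cons, ih]

-- the per-line (grapheme_count, line_no) pair A's loop processes
def pvPair (p : Int × (List Int × List Bool)) : Int × Int :=
  (((p.2.2.filter (fun x => x)).length : Int), p.1 + 1)

theorem step_eq_modify (d : PySem.Dict Int (List Int)) (p : Int × (List Int × List Bool)) :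
    (match d.get? (((p.2.2.filter (fun x => x)).length : Int)) with
      | some l => d.insert (((p.2.2.filter (fun x => x)).length : Int)) (l ++ [p.1 + 1])
      | none   => d.insert (((p.2.2.filter (fun x => x)).length : Int)) [p.1 + 1])
    = d.modify (((p.2.2.filter (fun x => x)).length : Int)) [] (fun v => v ++ [p.1 + 1]) := by
  have hm : d.modify (((p.2.2.filter (fun x => x)).length : Int)) [] (fun v => v ++ [p.1 + 1])
      = d.insert (((p.2.2.filter (fun x => x)).length : Int))
          ((d.getD (((p.2.2.filter (fun x => x)).length : Int)) []) ++ [p.1 + 1]) := rfl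
  cases h : d.get? (((p.2.2.filter (fun x => x)).length : Int)) with
  | some l => rw [hm, PySem.Dict.getD_of_get?_eq_some d [] h]
  | none   => rw [hm, PySem.Dict.getD_of_get?_eq_none d [] h]; rfl

theorem grepcases2_eq (tests : List (List Int × List Bool)) :
    grepcases2 tests = grepcases2_alt tests := by
  simp only [grepcases2, grepcases2_alt]
  have h1 : (PySem.List.enumerate tests 0).foldl (fun d p =>
      match d.get? (((p.2.2.filter (fun x => x)).length : Int)) with
      | some l => d.insert (((p.2.2.filter (fun x => x)).length : Int)) (l ++ [p.1 + 1])
      | none   => d.insert (((p.2.2.filter (fun x => x)).length : Int)) [p.1 + 1]) PySem.Dict.empty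
    = ((PySem.List.enumerate tests 0).map pvPair).foldl
        (fun d q => d.modify q.1 [] (fun v => v ++ [q.2])) PySem.Dict.empty := by
    rw [List.foldl_map]
    exact PySem.List.foldl_congr_mem _ _ _ _ (fun acc x _ => step_eq_modify acc x)
  rw [h1]
  have hkeys : (((PySem.List.enumerate tests 0).map pvPair).foldl
      (fun d q => d.modify q.1 [] (fun v => v ++ [q.2])) PySem.Dict.empty).keys
      = PySem.Set.ofList (tests.map (fun t => ((t.2.filter (fun x => x)).length : Int))) := by
    rw [PySem.Dict.keys_foldl_modify_key ((PySem.List.enumerate tests 0).map pvPair) (fun q : Int × Int => q.1) [] (fun _ q => fun v => v ++ [q.2])]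
    rw [PySem.Dict.keys_empty, PySem.Set.update_nil_left]
    congr 1
    rw [List.map_map]
    have h2 : tests.map (fun t => ((t.2.filter (fun x => x)).length : Int))
        = ((PySem.List.enumerate tests 0).map (fun p => p.2)).map
            (fun t => ((t.2.filter (fun x => x)).length : Int)) := by
      rw [PySem.List.map_snd_enumerate]
    rw [h2, List.map_map]
    rfl
  have hgetD : ∀ c : Int, (((PySem.List.enumerate tests 0).map pvPair).foldl
      (fun d q => d.modify q.1 [] (fun v => v ++ [q.2])) PySem.Dict.empty).getD c []
      = ((PySem.List.enumerate tests 0).filter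
          (fun p => (((p.2.2.filter (fun x => x)).length : Int)) == c)).map (fun p => p.1 + 1) := by
    intro c
    rw [PySem.Dict.getD_foldl_modify_append]
    rw [PySem.Dict.getD_empty, List.filter_map, List.map_map]
    rfl
  have hB : ∀ c : Int, ((PySem.List.enumerate
        (tests.map (fun t => ((t.2.filter (fun x => x)).length : Int))) 0).filter
        (fun p => p.2 == c)).map (fun p => PySem.Int.toStr (p.1 + 1))
      = (((PySem.List.enumerate tests 0).filter
          (fun p => (((p.2.2.filter (fun x => x)).length : Int)) == c)).map
            (fun p => p.1 + 1)).map PySem.Int.toStr := by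
    intro c
    rw [enumerate_map, List.filter_map, List.map_map, List.map_map]
    rfl
  rw [hkeys]
  refine PySem.List.foldl_congr_mem _ _ _ _ ?_
  intro acc c _
  rw [hgetD c, ← hB c]

-- ===== VERDICT (by name: the statement is the Claim_ definition above) =====
theorem grepcases2_spec : Claim_equal_grepcases2 := by
  intro tests _
  unfold Spec_grepcases2
  exact grepcases2_eq tests
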